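-- pv_equiv track=rewrite | github.com/mateus1991/Python_learning | two_lists_exercise.py | remove_divisible
-- ===== SOURCE A (Python) =====
-- def remove_divisible (enter_list,div):
--     # div - is the diviseble of that you want to remove from the list
--     enter_list_aux = []   #Auxiliar list to help removal
--
--     for i in range(len(enter_list)):
--         if float(enter_list[i] % div) == 0:
--             enter_list_aux.append(enter_list[i])
--
--     for i in range(len(enter_list_aux)):
--         enter_list.remove(enter_list_aux[i])
--
--     return enter_list
-- ===== SOURCE B (Python) =====
-- def remove_divisible(enter_list, div):
--     # Single in-place compaction pass with a write index, instead of
--     # collecting divisibles and repeatedly calling list.remove.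
--     w = 0
--     for x in enter_list:
--         if float(x % div) != 0:
--             enter_list[w] = x
--             w += 1
--     del enter_list[w:]
--     return enter_list
-- ===== Notes on version B (the rewrite author's own statement) =====
-- stated objective: alternative
-- what changed: Replaced A's collect-the-divisibles-then-repeated-list.remove scheme with a single in-place compaction pass using a write index, then truncating the tail.
import Mathlib
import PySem

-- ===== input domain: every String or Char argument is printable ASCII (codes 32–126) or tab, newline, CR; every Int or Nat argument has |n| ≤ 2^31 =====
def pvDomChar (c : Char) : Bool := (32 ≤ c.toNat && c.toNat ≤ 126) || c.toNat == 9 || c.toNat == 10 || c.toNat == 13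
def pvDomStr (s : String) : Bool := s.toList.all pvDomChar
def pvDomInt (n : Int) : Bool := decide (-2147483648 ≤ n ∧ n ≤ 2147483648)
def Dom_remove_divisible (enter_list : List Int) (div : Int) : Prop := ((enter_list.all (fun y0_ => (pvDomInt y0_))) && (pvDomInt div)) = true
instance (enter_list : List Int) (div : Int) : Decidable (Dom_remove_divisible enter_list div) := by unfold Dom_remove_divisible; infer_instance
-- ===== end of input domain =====

-- B replaces A's collect-divisibles-then-repeated-remove scheme with a single in-place
-- compaction pass using a write index (alternative single-pass algorithm). Both Pythons mutate enter_list to the same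
-- final contents and return it; the equivalence proved here is about the return value.


-- ===== PORT A =====
-- first loop: aux collects elements with x % div == 0 (indices via range(len));
-- second loop: list.remove for each aux element — the element is always present,
-- so remove? never returns none; .getD keeps the port total.
def remove_divisible (enter_list : List Int) (div : Int) : List Int :=
  let aux :=
    (PySem.List.pyRange 0 (enter_list.length : Int) 1).foldl
      (fun acc i =>
        if PySem.Int.mod (PySem.List.pyGetD enter_list i 0) div == 0 then
          acc ++ [PySem.List.pyGetD enter_list i 0]
        else acc) []
  (PySem.List.pyRange 0 (aux.length : Int) 1).foldl
    (fun lst i => (PySem.List.remove? lst (PySem.List.pyGetD aux i 0)).getD lst) enter_list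

-- ===== PORT B =====
-- single pass: state (working list, write index w); enter_list[w] = x on keep; del tail.
def remove_divisible_alt (enter_list : List Int) (div : Int) : List Int :=
  let st :=
    enter_list.foldl
      (fun (st : List Int × Nat) x =>
        if PySem.Int.mod x div ≠ 0 then (st.1.set st.2 x, st.2 + 1) else st)
      (enter_list, 0)
  st.1.take st.2

-- ===== PRECONDITION & SPEC =====
-- Python raises ZeroDivisionError (x % 0) in both A and B when div = 0.
def Pre_remove_divisible (enter_list : List Int) (div : Int) : Prop := div ≠ 0
instance (enter_list : List Int) (div : Int) : Decidable (Pre_remove_divisible enter_list div) := by unfold Pre_remove_divisible; infer_instance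
def pvWitness_remove_divisible : List Int × Int := ([1, 2, 3, 4, 6], 2)

def Spec_remove_divisible (enter_list : List Int) (div : Int) (out : List Int) : Prop := out = remove_divisible_alt enter_list div
instance (enter_list : List Int) (div : Int) (out : List Int) : Decidable (Spec_remove_divisible enter_list div out) := by unfold Spec_remove_divisible; infer_instance

-- ===== CLAIM (what is proved, stated in full; the proofs are below) =====
def Claim_equal_remove_divisible : Prop := ∀ (enter_list : List Int) (div : Int), Dom_remove_divisible enter_list div → Pre_remove_divisible enter_list div → Spec_remove_divisible enter_list div (remove_divisible enter_list div)

-- ===== LEMMAS AND PROOFS =====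

-- removing each element of a p-satisfying list from (y :: l) with !p y skips y
theorem rm_fold_cons (p : Int → Bool) (as : List Int) (y : Int) (l : List Int)
    (hall : ∀ a ∈ as, p a = true) (hy : p y = false) :
    as.foldl (fun lst a => (PySem.List.remove? lst a).getD lst) (y :: l)
      = y :: as.foldl (fun lst a => (PySem.List.remove? lst a).getD lst) l := by
  induction as generalizing l with
  | nil => rfl
  | cons a as ih =>
    have hne : y ≠ a := by
      intro h; rw [h] at hy; simp [hall a (by simp)] at hy
    rw [List.foldl_cons, List.foldl_cons, PySem.List.remove?_cons_of_ne l hne]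
    cases h : PySem.List.remove? l a with
    | none => simp only [Option.map_none, Option.getD_none]
              exact ih l (fun b hb => hall b (by simp [hb]))
    | some r => simp only [Option.map_some, Option.getD_some]
                exact ih r (fun b hb => hall b (by simp [hb]))

-- A's second loop on A's first loop's output filters out the p-elements
theorem rm_fold_filter (p : Int → Bool) (xs : List Int) :
    (xs.filter p).foldl (fun lst a => (PySem.List.remove? lst a).getD lst) xs
      = xs.filter (fun x => !p x) := by
  induction xs with
  | nil => rfl
  | cons y t ih =>
    by_cases hy : p y = true
    · simp [hy, ih]
    · have hy' : p y = false := by simpa using hy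
      rw [List.filter_cons, if_neg (by simp [hy']),
        rm_fold_cons p _ y t (fun a ha => (List.mem_filter.mp ha).2) hy', ih]
      simp [hy']

theorem set_append_length (kept : List Int) (r : Int) (rs : List Int) (x : Int) :
    (kept ++ r :: rs).set kept.length x = (kept ++ [x]) ++ rs := by
  induction kept with
  | nil => rfl
  | cons k ks ih => simp [ih]

-- invariant of B's compaction fold: the working list is kept ++ untouched tail
theorem compact_invariant (p : Int → Bool) (ys kept rest : List Int)
    (h : ys.length ≤ rest.length) :
    ((ys.foldl (fun (st : List Int × Nat) x =>
        if p x = false then (st.1.set st.2 x, st.2 + 1) else st)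
      (kept ++ rest, kept.length)).1.take
     (ys.foldl (fun (st : List Int × Nat) x =>
        if p x = false then (st.1.set st.2 x, st.2 + 1) else st)
      (kept ++ rest, kept.length)).2)
      = kept ++ ys.filter (fun x => !p x) := by
  induction ys generalizing kept rest with
  | nil => simp
  | cons x ys ih =>
    cases rest with
    | nil => simp at h
    | cons r rs =>
      by_cases hx : p x = true
      · rw [List.foldl_cons, if_neg (by simp [hx])]
        rw [ih kept (r :: rs) (by simp at h ⊢; omega)]
        simp [hx]
      · have hx' : p x = false := by simpa using hx
        rw [List.foldl_cons, if_pos hx', set_append_length]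
        have := ih (kept ++ [x]) rs (by simpa using h)
        simp only [List.length_append, List.length_cons, List.length_nil,
          Nat.zero_add] at this
        rw [this]
        simp [hx']

-- B computes the filter
theorem alt_eq_filter (enter_list : List Int) (div : Int) :
    remove_divisible_alt enter_list div
      = enter_list.filter (fun x => !(PySem.Int.mod x div == 0)) := by
  have hfun : (fun (st : List Int × Nat) x =>
        if PySem.Int.mod x div ≠ 0 then (st.1.set st.2 x, st.2 + 1) else st)
      = (fun (st : List Int × Nat) x =>
        if (PySem.Int.mod x div == 0) = false then (st.1.set st.2 x, st.2 + 1) else st) := by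
    funext st x; by_cases hx : PySem.Int.mod x div = 0 <;> simp [hx]
  simp only [remove_divisible_alt]
  rw [hfun]
  simpa using
    compact_invariant (fun x => PySem.Int.mod x div == 0) enter_list [] enter_list (le_refl _)

-- A computes the filter
theorem a_eq_filter (enter_list : List Int) (div : Int) :
    remove_divisible enter_list div
      = enter_list.filter (fun x => !(PySem.Int.mod x div == 0)) := by
  simp only [remove_divisible]
  rw [PySem.List.foldl_pyRange_zero_pyGetD' enter_list 0
      (fun acc x => if PySem.Int.mod x div == 0 then acc ++ [x] else acc) [],
    PySem.List.foldl_append_if (fun x => PySem.Int.mod x div == 0) (fun x => x)]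
  simp only [List.map_id_fun', id, List.nil_append]
  rw [PySem.List.foldl_pyRange_zero_pyGetD'
      (enter_list.filter (fun x => PySem.Int.mod x div == 0)) 0
      (fun lst a => (PySem.List.remove? lst a).getD lst) enter_list]
  exact rm_fold_filter (fun x => PySem.Int.mod x div == 0) enter_list

-- ===== VERDICT (by name: the statement is the Claim_ definition above) =====
theorem remove_divisible_spec : Claim_equal_remove_divisible := by
  intro enter_list div _ _
  unfold Spec_remove_divisible
  rw [a_eq_filter, alt_eq_filter]
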